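/- GENERATED by mk_final_copies.py from the proof of the farm's unit `start_decoder.C6b` (farm:start_decoder.C6b.1: Proof.lean) as the
   re-elaboration sweep compiled it — do not edit. -/
import Asan.CheckWalk
import Vorbis.Spec.Units.start_decoder_C6b
import Vorbis.Spec.StartDecoderCarry
import Vorbis.Spec.StartDecoderC7

open X86 X86.User Asan Vorbis Vorbis.Spec Vorbis.Spec.StartDecoder

set_option maxRecDepth 100000
set_option maxHeartbeats 4000000

namespace Vorbis.Spec.start_decoder_C6b

/-- A window of segment C6b: the stack below the steady rsp (the pushed return addresses of the check call and of `error`, their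
frames), the pointer field at offset `o` of the struct `cb(i)` at `c` (`o = 40`: `codewords`), `f->eof` / `f->error`
`[f + 136, f + 144)`. -/
def C6bWin (g : Ghost) (c o : Nat) (w : Span) : Prop :=
  (g.R - 408 ≤ w.lo ∧ w.hi ≤ g.R) ∨ (c + o ≤ w.lo ∧ w.hi ≤ c + o + 8) ∨ (g.f + 136 ≤ w.lo ∧ w.hi ≤ g.f + 144)

/-- **THE INVARIANT SIDE OF A SEGMENT THAT STORES ONE POINTER FIELD OF THE STRUCT `cb(i)`** (C6b: `codewords`, offset 40; the twin of
farm/worked/start_decoder.C2d's `c2d_carry`; it serves C6c / C6d with offsets 8 / 40): from `Frame` and CUR(i) at `v` and a later state `s` whose memory differs from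
`v.mem` only in windows `C6bWin` (no shadow byte): `Frame` at the new program counter, CUR(i), `cb(i)` unmoved, and the struct's bytes
before and after the field are kept (`Block.Kept`: every other field reads the same). -/
theorem c6b_carry {u₀ : State} {g : Ghost} {pc pc' : Word} {i : Nat} {A2 A3 Ai : Arena} {A : Arena × List Obj} {v s : State}
    {ws : List Span} (o : Nat) (ho : o + 8 ≤ 2120) (hfr : Frame u₀ g pc A v) (hcur : Cur g i A2 A3 Ai A v)
    (hs : Mem.SameExcept ws v.mem s.mem) (hun : ShadowUntouched v.mem s.mem)
    (hok : ∀ w, w ∈ ws → C6bWin g (g.cb v.mem i) o w)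
    (hrip : s.rip = pc') (hrsp : s.reg .rsp = v.reg .rsp) (hcode : CodeOK u₀ s.mem) (hinv : abiInv s)
    (hr14 : s.reg .r14 = v.reg .r14) :
    Frame u₀ g pc' A s ∧ Cur g i A2 A3 Ai A s ∧ g.cb s.mem i = g.cb v.mem i ∧
      (⟨g.cb v.mem i, o⟩ : Block).Kept v.mem s.mem ∧ (⟨g.cb v.mem i + o + 8, 2120 - o - 8⟩ : Block).Kept v.mem s.mem := by
  have hpos : Pos g A := Pos.of hfr hcur
  have hm0 : MInv g i A2 A3 Ai A v.mem := MInv.of hfr hcur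
  have hcw := hm0.c_where
  have p1 := hpos.r_eq
  have p2 := hpos.ra_lo
  have p3 := hpos.ra_hi
  have p4 := hpos.f_lo
  have p5 := hpos.f_hi
  have p6 := hpos.f_stack
  have p7 := hpos.objOut
  have p9 := hpos.ar_lo
  have p10 := hpos.ar_hi
  have p11 := hpos.ar_stack
  have hok0 : ∀ w, w ∈ ws → OkWin g Ai A (g.cb v.mem i) w := by
    intro w hw
    have k := hok w hw
    unfold C6bWin at k
    left
    unfold OkWin0
    omega
  have hb : Bits (g.Blk A) g.len s.mem g.f := by
    apply bits_kept hpos hcur.sd.bits hs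
    intro w hw
    have k := hok w hw
    unfold C6bWin at k
    omega
  have hfr' := Frame.step hfr hcur hs hun hok0 hb hrip hrsp hcode hinv
  obtain ⟨hcur', hcb⟩ := Cur.step hfr hcur hs hun hok0 hb hr14
  refine ⟨hfr', hcur', hcb, ?_, ?_⟩
  · apply Block.Kept.of_sameExcept hs _ (by simp only []; omega)
    intro w hw
    have k := hok w hw
    unfold C6bWin at k
    simp only []
    omega
  · apply Block.Kept.of_sameExcept hs _ (by simp only []; omega)
    intro w hw
    have k := hok w hw
    unfold C6bWin at k
    simp only []
    omega

/-- **The fields of the book that the store `c->codewords = p` does not touch** read the same (the bytes `[c, c + 40)` and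
`[c + 48, c + 2120)` are kept). -/
theorem c6b_fields {m m' : Mem} {c : Nat} (hlo : (⟨c, 40⟩ : Block).Kept m m')
    (hhi : (⟨c + 40 + 8, 2120 - 40 - 8⟩ : Block).Kept m m') :
    Codebook.dimensions m' c = Codebook.dimensions m c ∧ Codebook.entries m' c = Codebook.entries m c ∧
      Codebook.codeword_lengths m' c = Codebook.codeword_lengths m c ∧ Codebook.sparse m' c = Codebook.sparse m c ∧
      Codebook.sorted_entries m' c = Codebook.sorted_entries m c ∧
      (Fresh5 m c → Fresh5 m' c) := by
  have e_dim : Codebook.dimensions m' c = Codebook.dimensions m c := by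
    simp only [vacc, voff]
    exact hlo.i32 _ (by simp only []; omega) (by simp only []; omega)
  have e_ent : Codebook.entries m' c = Codebook.entries m c := by
    simp only [vacc, voff]
    exact hlo.i32 _ (by simp only []; omega) (by simp only []; omega)
  have e_cl : Codebook.codeword_lengths m' c = Codebook.codeword_lengths m c := by
    simp only [vacc, voff]
    exact hlo.u64 _ (by simp only []; omega) (by simp only []; omega)
  have e_sp : Codebook.sparse m' c = Codebook.sparse m c := by
    simp only [vacc, voff]
    exact hlo.u8 _ (by simp only []; omega) (by simp only []; omega)
  have e_lt : Codebook.lookup_type m' c = Codebook.lookup_type m c := by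
    simp only [vacc, voff]
    exact hlo.u8 _ (by simp only []; omega) (by simp only []; omega)
  have e_lv : Codebook.lookup_values m' c = Codebook.lookup_values m c := by
    simp only [vacc, voff]
    exact hlo.u32 _ (by simp only []; omega) (by simp only []; omega)
  have e_mu : Codebook.multiplicands m' c = Codebook.multiplicands m c := by
    simp only [vacc, voff]
    exact hlo.u64 _ (by simp only []; omega) (by simp only []; omega)
  have e_sc : Codebook.sorted_codewords m' c = Codebook.sorted_codewords m c := by
    simp only [vacc, voff]
    exact hhi.u64 _ (by simp only []; omega) (by simp only []; omega)
  have e_sv : Codebook.sorted_values m' c = Codebook.sorted_values m c := by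
    simp only [vacc, voff]
    exact hhi.u64 _ (by simp only []; omega) (by simp only []; omega)
  have e_se : Codebook.sorted_entries m' c = Codebook.sorted_entries m c := by
    simp only [vacc, voff]
    exact hhi.i32 _ (by simp only []; omega) (by simp only []; omega)
  refine ⟨e_dim, e_ent, e_cl, e_sp, e_se, ?_⟩
  intro fr
  exact
    { lookup_type := by rw [e_lt]; exact fr.lookup_type
      lookup_values := by rw [e_lv]; exact fr.lookup_values
      multiplicands := by rw [e_mu]; exact fr.multiplicands
      sorted_codewords := by rw [e_sc]; exact fr.sorted_codewords
      sorted_values := by rw [e_sv]; exact fr.sorted_values }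

/-- Segment C6b: from the return of `setup_malloc(f, 4·entries)` (0x1148b0, `AtC6b`): the checked store `c->codewords = rax`
(`C7.cb_site`; the invariant side is `c6b_carry` + `c6b_fields`; the bytes of `lengths` by `young_off_book`), then NULL → the outofmem
stub (`error`, `AtERR` by `Cur.failed` on the carried CUR(i)), else `mov r12d,0` and `AtC7` by `C6.built_dense`. -/
theorem c6b_walk : Vorbis.Spec.start_decoder_C6b.Statement := by
  intro Lay hLay μ hμ u₀ hcode h_error hst8
  intro g i v hat
  obtain ⟨A, lengths, A2, A3, Ai, Aw, h⟩ := hat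
  have hfr := h.mid.frame
  have hhand := h.mid.cur.hand
  have he := hfr.entry
  v_entry he
  simp only [depth] at he_room he_stack
  have w_rip := hfr.rip
  have w_rsp := hfr.rsp
  have w_eq : Mem.EqOn Vorbis.L.textLo Vorbis.L.textHi u₀.mem v.mem := hfr.code
  have hdf : v.flags .df = false := (show abiInv _ from hfr.inv).1
  have hmx : v.mxcsr &&& 0x1F80 = 0x1F80 := (show abiInv _ from hfr.inv).2
  have hsse := Vorbis.sseOK_of_abiInv hfr.inv
  obtain ⟨hR1, hR2⟩ := hfr.r_eq
  have eR : g.R = (g.e.reg .rsp).toNat - 1480 := rfl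
  have eRA : g.RA = (g.e.reg .rsp).toNat := rfl
  have c_rsp : v.reg .rsp = g.e.reg .rsp - 1480 := by
    rw [w_rsp, eR, ← Vorbis.addr_sub_lit _ 1480 (by show (1480 : Nat) ≤ _; omega), Vorbis.addr_toNat]
  clear w_rsp
  have k_rsp := c_rsp
  have r_f : v.mem.readLE (g.e.reg .rsp - 1456) 8 = g.f := by
    have e : g.e.reg .rsp - 1456 = addr (g.R + 0x18) := by
      have e1 : g.R + 0x18 = (g.e.reg .rsp).toNat - 1456 := by
        show (g.e.reg .rsp).toNat - 1480 + 0x18 = _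
        omega
      rw [e1, ← Vorbis.addr_sub_lit _ 1456 (by show (1456 : Nat) ≤ _; omega), Vorbis.addr_toNat]
    rw [e]
    exact h.mid.cur.slot_f
  have hpos : Pos g A := Pos.of hfr h.mid.cur
  have hm0 : MInv g i A2 A3 Ai A v.mem := MInv.of hfr h.mid.cur
  have hcw := hm0.c_where
  -- the `lengths` block: allocated since `Ai`, so inside the arena and off the struct
  have hlenS : Since Ai A.1 ⟨lengths, (Codebook.entries v.mem (g.cb v.mem i)).toNat⟩ := by
    have := h.dense_lengths
    rw [← h.dense_eq] at this
    exact this.mono h.mid.extw'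
  obtain ⟨hlin, hloff⟩ := young_off_book hm0 hlenS
  simp only [] at hlin hloff
  obtain ⟨c, hc⟩ : ∃ c, g.cb v.mem i = c := ⟨_, rfl⟩
  have c_r14 := h.mid.cur.r14
  rw [hc] at c_r14 hcw hlin hloff
  have hcT : (addr c).toNat = c := Vorbis.toNat_addr _ (by omega)
  have hfT : (addr g.f).toNat = g.f := Vorbis.toNat_addr _ (by
    have := hpos.f_hi
    omega)
  have hsub : ∀ o, o ∈ stackObjs g.frames ++ A.2 → o ∈ stackObjs g.frames' ++ A.2 := by
    intro o ho
    unfold Ghost.frames'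
    rw [stackObjs_cons]
    rcases List.mem_append.mp ho with hs | ho'
    · exact List.mem_append_left _ (List.mem_append_right _ hs)
    · exact List.mem_append_right _ ho'
  have herr := h_error A.2 g.frames'
  have hText : 1154368 ≤ A.1.B := hhand.arenaText
  have t1 : (g.e.reg .rsp - 1488).toNat = (g.e.reg .rsp).toNat - 1488 := by u_omega
  have hfn : (UInt64.ofNat g.f).toNat = g.f := hfT
  u_walk hcode [hμ.vendor] until [pc_C7, pc_ERR] span [Vorbis.L.textLo, Vorbis.L.textHi] side (v_side)
  case check_1148b7 =>
    have hun : ShadowUntouched v.mem s_1148b7.mem := by v_untouched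
    have hsite := C7.cb_site h.mid.cur 40 8 (by omega) (by omega)
    rw [hc] at hsite
    apply Vorbis.Spec.check_site hfr.shadow hun hsite
    u_omega
  case call_inv => v_inv
  case pre_1148dd =>
    have hun : ShadowUntouched v.mem s_1148dd.mem := by v_untouched
    have hf' : (s_1148dd.reg .rdi).toNat = g.f := by
      rw [w_rdi]
      exact hfn
    have hrs : (s_1148dd.reg .rsp).toNat + 8 = g.R := by
      rw [w_rsp, t1]
      omega
    refine ⟨⟨?_, hfr.offText⟩, ?_⟩
    · rw [hrs]
      exact hfr.shadow.untouched hun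
    · rw [hf']
      exact hhand.obj.mono hsub
  case cont =>
    -- `error(f, VORBIS_outofmem)` returned (after the store of the NULL): the `jmp` to the epilogue
    have hsA : Mem.SameExcept [⟨g.R - 408, g.R⟩, ⟨c + 40, c + 48⟩] v.mem s_1148dd.mem := by u_same
    have hunA : ShadowUntouched v.mem s_1148dd.mem := by v_untouched
    rw [w_mem_1148dd] at hsA hunA
    v_after_call w_rsp_1148dd w_mem_1148dd
    have hf : (s_1148dd.reg .rdi).toNat = g.f := by
      rw [w_rdi_1148dd]
      exact hfn
    simp only [hf, t1] at w_same
    have hp : s_1148ddr.reg .rax = 0 ∧ ShadowUntouched s_1148dd.mem s_1148ddr.mem ∧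
        s_1148ddr.mem.readLE (s_1148dd.reg .rdi + 140) 4 = (s_1148dd.reg .rsi).toNat % 2 ^ 32 := w_post
    have w_rax : s_1148ddr.reg .rax = 0 := hp.1
    have hun3 : ShadowUntouched s_1148dd.mem s_1148ddr.mem := hp.2.1
    rw [w_mem_1148dd] at hun3
    have hsB : Mem.SameExcept [⟨g.R - 408, g.R⟩, ⟨c + 40, c + 48⟩, ⟨g.f + 140, g.f + 144⟩] v.mem s_1148ddr.mem := by
      refine (C7.sameExcept_weaken hsA ?_).trans (w_same.mono ?_)
      · intro w hw
        simp only [List.mem_cons, List.mem_nil_iff, or_false] at hw ⊢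
        rcases hw with rfl | rfl
        · exact Or.inl rfl
        · exact Or.inr (Or.inl rfl)
      · intro w hw a h1 h2
        simp only [List.mem_cons, List.mem_nil_iff, or_false] at hw
        rcases hw with rfl | rfl
        · simp only [] at h1 h2
          exact ⟨_, List.mem_cons_self, by simp only []; omega, by simp only []; omega⟩
        · simp only [] at h1 h2
          exact ⟨_, List.mem_cons_of_mem _ (List.mem_cons_of_mem _ List.mem_cons_self), by simp only []; omega,
            by simp only []; omega⟩
    have hunB : ShadowUntouched v.mem s_1148ddr.mem := Mem.EqOn.trans hunA hun3
    have hokB : ∀ w, w ∈ [(⟨g.R - 408, g.R⟩ : Span), ⟨c + 40, c + 48⟩, ⟨g.f + 140, g.f + 144⟩] →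
        C6bWin g (g.cb v.mem i) 40 w := by
      intro w hw
      rw [hc]
      simp only [List.mem_cons, List.mem_nil_iff, or_false] at hw
      unfold C6bWin
      rcases hw with rfl | rfl | rfl <;> simp only [] <;> omega
    u_walk hcode [hμ.vendor] until [pc_C7, pc_ERR] span [Vorbis.L.textLo, Vorbis.L.textHi] side (v_side)
    have hsC : Mem.SameExcept [⟨g.R - 408, g.R⟩, ⟨c + 40, c + 48⟩, ⟨g.f + 140, g.f + 144⟩] v.mem s_1148e2.mem := by
      rw [w_mem]
      exact hsB
    have hunC : ShadowUntouched v.mem s_1148e2.mem := by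
      rw [w_mem]
      exact hunB
    have hinv' : abiInv s_1148e2 := by
      refine Vorbis.abiInv_of ?_ ?_
      · rw [w_flags]
        exact w_df
      · rw [w_mxcsr]
        exact w_mx
    have hrsp' : s_1148e2.reg .rsp = v.reg .rsp := by
      rw [w_rsp, c_rsp]
    obtain ⟨hfr', hcur', _, _, _⟩ := c6b_carry 40 (by omega) hfr h.mid.cur hsC hunC hokB w_rip hrsp' w_eq hinv'
      (w_kept.get .r14 rfl)
    apply ReachVia.done
    refine Or.inr ⟨A, hfr', hhand, Or.inl ⟨?_, hcur'.failed⟩⟩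
    rw [w_rax]
    rfl
  case cont =>
    -- `codewords ≠ NULL`: `values = 0`, the entry of C7
    have hne : ¬ v.reg .rax = 0 := by
      intro h0
      rw [h0] at hbr_1148c3
      exact hbr_1148c3 rfl
    have hS : Since Aw A.1 ⟨(v.reg .rax).toNat, 4 * (Codebook.entries v.mem c).toNat⟩ := by
      rcases h.res with h0 | hS
      · exact absurd h0 hne
      · rw [hc] at hS
        exact hS
    have hsA : Mem.SameExcept [⟨g.R - 408, g.R⟩, ⟨c + 40, c + 48⟩] v.mem s_1148cb.mem := by u_same
    have hunA : ShadowUntouched v.mem s_1148cb.mem := by v_untouched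
    have hokA : ∀ w, w ∈ [(⟨g.R - 408, g.R⟩ : Span), ⟨c + 40, c + 48⟩] → C6bWin g (g.cb v.mem i) 40 w := by
      intro w hw
      rw [hc]
      simp only [List.mem_cons, List.mem_nil_iff, or_false] at hw
      unfold C6bWin
      rcases hw with rfl | rfl <;> simp only [] <;> omega
    have hrsp' : s_1148cb.reg .rsp = v.reg .rsp := by
      rw [w_rsp, c_rsp]
    obtain ⟨hfr', hcur', hcb, hlo, hhi⟩ := c6b_carry 40 (by omega) hfr h.mid.cur hsA hunA hokA w_rip hrsp' w_eq (by v_inv)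
      (w_kept.get .r14 rfl)
    rw [hc] at hcb hlo hhi
    obtain ⟨e_dim, e_ent, e_cl, e_sp, e_se, hfresh⟩ := c6b_fields hlo hhi
    have e_cw : Codebook.codewords s_1148cb.mem c = (v.reg .rax).toNat := by
      simp only [vacc, voff]
      unfold Mem.u64
      rw [← Vorbis.addr_add_lit, w_mem]
      u_read
    -- the bytes of `lengths` are kept: the block is inside the arena's buffer, off the stack and off the struct
    have p1 := hpos.r_eq
    have p2 := hpos.ra_lo
    have p3 := hpos.ra_hi
    have p10 := hpos.ar_hi
    have p11 := hpos.ar_stack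
    have hlenE : Mem.EqOn lengths (lengths + (Codebook.entries v.mem c).toNat) v.mem s_1148cb.mem := by
      apply hsA.eqOn
      intro w hw
      simp only [List.mem_cons, List.mem_nil_iff, or_false] at hw
      rcases hw with rfl | rfl <;> simp only [] <;> omega
    have hlenI : lengths + (Codebook.entries v.mem c).toNat ≤ 2 ^ 64 := by omega
    have hk1 := h.mid.k1
    have hk2 := h.mid.k2
    have hsp0 := h.sparse0
    have hfr5 := h.mid.fresh
    have hlenL := h.mid.lenL
    have hdl := h.dense_lengths
    have hdeq := h.dense_eq
    have hcnt := h.cnt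
    rw [hc] at hk1 hk2 hsp0 hfr5 hlenL hdl hdeq hcnt
    apply ReachVia.done
    refine Or.inl ⟨A, lengths, 0, A2, A3, Ai, Aw, ?_⟩
    refine
      { frame := hfr'
        built := C6.built_dense hcur' h.mid.extw h.mid.extw' ?_ ?_ ((w_kept.get .rbx rfl).trans h.mid.rbx) ?_ ?_ ?_ ?_ ?_ ?_
          h.noTemps ?_ ?_ }
    · rw [hcb]
      exact ⟨by rw [e_dim]; exact hk1.dim_pos, by rw [e_dim]; exact hk1.dim_le, by rw [e_ent]; exact hk1.ent_nonneg,
        by rw [e_ent]; exact hk1.ent_lt⟩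
    · rw [hcb]
      exact
        { sparse_01 := by rw [e_sp]; exact hk2.sparse_01
          se_nonneg := by rw [e_se]; exact hk2.se_nonneg
          se_le := by rw [e_se, e_ent]; exact hk2.se_le
          sparse_pos := by rw [e_sp, e_se]; exact hk2.sparse_pos
          sparse_quarter := by rw [e_sp, e_se, e_ent]; exact hk2.sparse_quarter }
    · rw [w_r12]
      rfl
    · rw [hcb, e_ent]
      exact hlenL.same hlenE hlenI
    · rw [hcb, e_sp]
      exact hsp0
    · rw [hcb, e_cl, e_ent]
      exact hdl
    · rw [hcb, e_cw, e_ent]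
      exact hS
    · rw [hcb, e_cl]
      exact hdeq
    · rw [hcb]
      unfold CNT' at hcnt ⊢
      rw [e_ent, e_se, C7.longCount_same hlenE hlenI]
      exact hcnt
    · rw [hcb]
      exact hfresh hfr5

end Vorbis.Spec.start_decoder_C6b

theorem Vorbis.Spec.Worked.start_decoder_C6b_ok : Vorbis.Spec.start_decoder_C6b.Statement := Vorbis.Spec.start_decoder_C6b.c6b_walk
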